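-- pv_equiv track=rewrite | github.com/bc5g15/AoC_Solutions | 2018/10/p2.py | check_hv
-- ===== SOURCE A (Python) =====
-- def create_pset(points):
--     out = set()
--     for p in points:
--         out.add((p[0], p[1]))
--     return out
--
-- def check_hv(points):
--     ps = create_pset(points)
--     h = 0
--     v = 0
--
--     while len(ps)>0:
--         p = ps.pop()
--         for d in [1, -1]:
--             if (p[0]+d, p[1]) in ps:
--                 h += 1
--             if (p[0], p[1]+d) in ps:
--                 v += 1
--     return (h, v)
-- ===== SOURCE B (Python) =====
-- def check_hv(points):
--     pts = set((p[0], p[1]) for p in points)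
--     rows = {}
--     cols = {}
--     for (x, y) in pts:
--         rows.setdefault(y, []).append(x)
--         cols.setdefault(x, []).append(y)
--     h = 0
--     for xs in rows.values():
--         xs = sorted(xs)
--         h += sum(1 for a, b in zip(xs, xs[1:]) if b - a == 1)
--     v = 0
--     for ys in cols.values():
--         ys = sorted(ys)
--         v += sum(1 for a, b in zip(ys, ys[1:]) if b - a == 1)
--     return (h, v)
-- ===== Notes on version B (the rewrite author's own statement) =====
-- stated objective: alternative
-- what changed: Replaces A's destructive pop-while-membership loop over the point set by a group-by-coordinate decomposition: points are grouped into rows (by y) and columns (by x), each group's coordinates are sorted, and adjacent pairs are counted by a consecutive-difference scan over zipped neighbours.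
import Mathlib
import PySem

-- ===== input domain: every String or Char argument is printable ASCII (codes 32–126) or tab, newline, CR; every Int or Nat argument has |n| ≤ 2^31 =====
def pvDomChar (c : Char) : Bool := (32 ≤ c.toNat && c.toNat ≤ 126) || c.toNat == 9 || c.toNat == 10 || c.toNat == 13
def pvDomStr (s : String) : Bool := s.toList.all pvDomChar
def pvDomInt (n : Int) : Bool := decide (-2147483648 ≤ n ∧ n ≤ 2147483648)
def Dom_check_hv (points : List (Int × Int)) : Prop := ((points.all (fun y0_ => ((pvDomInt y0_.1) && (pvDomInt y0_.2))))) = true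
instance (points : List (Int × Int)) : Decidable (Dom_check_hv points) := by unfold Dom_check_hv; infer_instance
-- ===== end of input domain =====

-- B replaces A's destructive pop-and-probe loop over the point set by a group-by
-- row/column, sort, adjacent-difference scan (alternative decomposition, similar cost).

-- ===== PORT A =====
-- create_pset: builds the set of (p[0], p[1]) tuples
def create_pset (points : List (Int × Int)) : PySem.Set (Int × Int) :=
  points.foldl (fun out p => PySem.Set.add out (p.1, p.2)) PySem.Set.empty

-- the 'while len(ps)>0: p = ps.pop(); for d in [1,-1]: …' loop; ps.pop() takes the
-- set's first stored element (the result is order-independent, as proved below)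
def pvCheckLoop : List (Int × Int) → Int → Int → Int × Int
  | [], h, v => (h, v)
  | p :: ps, h, v =>
    let hv := [(1 : Int), -1].foldl (fun hv d =>
      ((if PySem.Set.contains ps (p.1 + d, p.2) then hv.1 + 1 else hv.1),
       (if PySem.Set.contains ps (p.1, p.2 + d) then hv.2 + 1 else hv.2))) (h, v)
    pvCheckLoop ps hv.1 hv.2

def check_hv (points : List (Int × Int)) : Int × Int :=
  pvCheckLoop (create_pset points) 0 0

-- ===== PORT B =====
-- xs = sorted(xs); sum(1 for a, b in zip(xs, xs[1:]) if b - a == 1)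
def pvAdjSorted (xs : List Int) : Int :=
  (((PySem.List.sorted xs (fun x => x) false).zip
      (PySem.List.slice (PySem.List.sorted xs (fun x => x) false) (some 1) none)).countP
    (fun q => q.2 - q.1 == 1) : Nat)

def check_hv_alt (points : List (Int × Int)) : Int × Int :=
  let pts := PySem.Set.ofList points
  -- for (x, y) in pts: rows.setdefault(y, []).append(x); cols.setdefault(x, []).append(y)
  let rows := pts.foldl (fun d p => PySem.Dict.modify d p.2 [] (· ++ [p.1])) PySem.Dict.empty
  let cols := pts.foldl (fun d p => PySem.Dict.modify d p.1 [] (· ++ [p.2])) PySem.Dict.empty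
  let h := (PySem.Dict.values rows).foldl (fun acc xs => acc + pvAdjSorted xs) 0
  let v := (PySem.Dict.values cols).foldl (fun acc ys => acc + pvAdjSorted ys) 0
  (h, v)

-- ===== PRECONDITION & SPEC =====
def Spec_check_hv (points : List (Int × Int)) (out : Int × Int) : Prop := out = check_hv_alt points
instance (points : List (Int × Int)) (out : Int × Int) : Decidable (Spec_check_hv points out) := by unfold Spec_check_hv; infer_instance

-- ===== CLAIM (what is proved, stated in full; the proofs are below) =====
def Claim_equal_check_hv : Prop := ∀ (points : List (Int × Int)), Dom_check_hv points → Spec_check_hv points (check_hv points)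

-- ===== LEMMAS AND PROOFS =====

-- number of points of S whose image under the translation f is also in S
def pvNbr (S : List (Int × Int)) (f : Int × Int → Int × Int) : Nat :=
  S.countP (fun p => decide (f p ∈ S))

def pvH (p : Int × Int) : Int × Int := (p.1 + 1, p.2)
def pvV (p : Int × Int) : Int × Int := (p.1, p.2 + 1)

lemma countP_or_disjoint {α : Type} (l : List α) (a b : α → Bool)
    (h : ∀ x ∈ l, ¬(a x = true ∧ b x = true)) :
    l.countP (fun x => a x || b x) = l.countP a + l.countP b := by
  induction l with
  | nil => simp
  | cons x t ih =>
    have hx := h x (by simp)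
    have ht : ∀ y ∈ t, ¬(a y = true ∧ b y = true) := fun y hy => h y (by simp [hy])
    simp only [List.countP_cons, ih ht]
    cases ha : a x <;> cases hb : b x <;> simp_all <;> omega

lemma countP_beq_nodup (l : List (Int × Int)) (hnd : l.Nodup) (v : Int × Int) :
    l.countP (fun x => x == v) = if v ∈ l then 1 else 0 := by
  have : l.countP (fun x => x == v) = l.count v := by simp [List.count]
  rw [this]
  split_ifs with hm
  · exact List.count_eq_one_of_mem hnd hm
  · exact List.count_eq_zero_of_not_mem hm

-- popping one point: its two neighbours in each direction appear once each
lemma pvNbr_cons (ps : List (Int × Int)) (p : Int × Int) (f g : Int × Int → Int × Int)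
    (hp : p ∉ ps) (hnd : ps.Nodup)
    (hfg : ∀ q w, f q = w ↔ q = g w) (hfp : f p ≠ p) :
    pvNbr (p :: ps) f
      = pvNbr ps f + ((if f p ∈ ps then 1 else 0) + (if g p ∈ ps then 1 else 0)) := by
  unfold pvNbr
  rw [List.countP_cons]
  have h1 : (decide (f p ∈ p :: ps)) = decide (f p ∈ ps) := by
    simp [List.mem_cons, hfp]
  have h2 : ps.countP (fun q => decide (f q ∈ p :: ps))
      = ps.countP (fun q => (f q == p) || decide (f q ∈ ps)) := by
    apply List.countP_congr
    intro q _
    simp only [List.mem_cons]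
    by_cases hq : f q = p <;> simp [hq]
  rw [h1, h2, countP_or_disjoint]
  · have h3 : ps.countP (fun q => f q == p) = ps.countP (fun q => q == g p) := by
      apply List.countP_congr
      intro q _
      simp only [beq_iff_eq]
      simp [hfg]
    rw [h3, countP_beq_nodup ps hnd (g p)]
    cases hm : decide (f p ∈ ps) <;> simp_all <;> omega
  · intro q hq ⟨ha, hb⟩
    simp only [beq_iff_eq, decide_eq_true_eq] at ha hb
    exact hp (ha ▸ hb)

-- A's pop loop computes the two neighbour counts (regardless of pop order)
lemma pvCheckLoop_eq (S : List (Int × Int)) (h v : Int) (hnd : S.Nodup) :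
    pvCheckLoop S h v = (h + (pvNbr S pvH : Int), v + (pvNbr S pvV : Int)) := by
  induction S generalizing h v with
  | nil => simp [pvCheckLoop, pvNbr]
  | cons p ps ih =>
    have hp : p ∉ ps := (List.nodup_cons.mp hnd).1
    have hnd' : ps.Nodup := (List.nodup_cons.mp hnd).2
    rw [show pvCheckLoop (p :: ps) h v = pvCheckLoop ps
        ((if PySem.Set.contains ps (p.1 + 1, p.2) then h + 1 else h) +
          (if PySem.Set.contains ps (p.1 + -1, p.2) then 1 else 0))
        ((if PySem.Set.contains ps (p.1, p.2 + 1) then v + 1 else v) +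
          (if PySem.Set.contains ps (p.1, p.2 + -1) then 1 else 0)) from by
      simp only [pvCheckLoop, List.foldl]
      split_ifs <;> simp]
    rw [ih _ _ hnd']
    have hH := pvNbr_cons ps p pvH (fun w => (w.1 - 1, w.2)) hp hnd'
      (by intro q w; simp [pvH, Prod.ext_iff]; omega)
      (by simp [pvH, Prod.ext_iff])
    have hV := pvNbr_cons ps p pvV (fun w => (w.1, w.2 - 1)) hp hnd'
      (by intro q w; simp [pvV, Prod.ext_iff]; omega)
      (by simp [pvV, Prod.ext_iff])
    rw [hH, hV]
    simp only [pvH, pvV, PySem.Set.contains_eq_listContains, List.contains_eq_mem,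
      show p.1 + -1 = p.1 - 1 from by ring, show p.2 + -1 = p.2 - 1 from by ring]
    simp only [decide_eq_true_eq]
    split_ifs <;> (refine Prod.ext ?_ ?_ <;> push_cast <;> ring)

-- the adjacent-difference scan over the sorted list counts right-neighbours
lemma pvAdjScan (s : List Int) (hlt : s.Pairwise (· < ·)) :
    (s.zip s.tail).countP (fun q => q.2 - q.1 == 1)
      = s.countP (fun x => decide (x + 1 ∈ s)) := by
  induction s with
  | nil => simp
  | cons a t ih =>
    match t, hlt with
    | [], _ => simp
    | b :: t, hlt =>
      have ha : ∀ x ∈ b :: t, a < x := fun x hx => (List.pairwise_cons.mp hlt).1 x hx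
      have hlt' : (b :: t).Pairwise (· < ·) := (List.pairwise_cons.mp hlt).2
      have htail : (b :: t).countP (fun x => decide (x + 1 ∈ a :: b :: t))
          = (b :: t).countP (fun x => decide (x + 1 ∈ b :: t)) := by
        apply List.countP_congr
        intro x hx
        have : x + 1 ≠ a := by have := ha x hx; omega
        simp [List.mem_cons, this]
      have hhead : (decide (a + 1 ∈ a :: b :: t)) = (decide (b - a = 1)) := by
        rw [decide_eq_decide]
        have hab := ha b (by simp)
        constructor
        · intro hmem
          rcases List.mem_cons.mp hmem with h1 | hmem'
          · omega
          · rcases List.mem_cons.mp hmem' with h2 | h3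
            · omega
            · have := (List.pairwise_cons.mp hlt').1 (a + 1) h3
              omega
        · intro hd
          have : a + 1 = b := by omega
          simp [this]
      have expand : (a :: b :: t).countP (fun x => decide (x + 1 ∈ a :: b :: t))
          = (b :: t).countP (fun x => decide (x + 1 ∈ b :: t)) + (if b - a = 1 then 1 else 0) := by
        rw [List.countP_cons, htail, hhead]
        split_ifs <;> simp_all
      rw [expand]
      have ihs : ((b :: t).zip t).countP (fun q => q.2 - q.1 == 1)
          = (b :: t).countP (fun x => decide (x + 1 ∈ b :: t)) := ih hlt'
      simp only [List.countP_cons]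
      split_ifs <;> simp_all

lemma pvSorted_pairwise_lt (xs : List Int) (hnd : xs.Nodup) :
    (PySem.List.sorted xs (fun x => x) false).Pairwise (· < ·) := by
  have hle : (PySem.List.sorted xs (fun x => x) false).Pairwise (fun a b => a ≤ b) :=
    PySem.List.sorted_pairwise xs (fun x => x)
  have hnd' : (PySem.List.sorted xs (fun x => x) false).Nodup :=
    (PySem.List.sorted_perm xs (fun x => x) false).nodup_iff.mpr hnd
  exact (hle.and hnd').imp (fun h => lt_of_le_of_ne h.1 h.2)

lemma pvAdjSorted_eq (xs : List Int) (hnd : xs.Nodup) :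
    pvAdjSorted xs = (xs.countP (fun x => decide (x + 1 ∈ xs)) : Nat) := by
  unfold pvAdjSorted
  rw [PySem.List.slice_from_one]
  have hperm := PySem.List.sorted_perm xs (fun x => x) false
  rw [pvAdjScan _ (pvSorted_pairwise_lt xs hnd)]
  have h1 : (PySem.List.sorted xs (fun x => x) false).countP
        (fun x => decide (x + 1 ∈ PySem.List.sorted xs (fun x => x) false))
      = (PySem.List.sorted xs (fun x => x) false).countP (fun x => decide (x + 1 ∈ xs)) := by
    apply List.countP_congr
    intro x _
    simp [PySem.List.mem_sorted]
  rw [h1, hperm.countP_eq]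

-- splitting a count over the distinct values of a key
lemma countP_partition {α κ : Type} [DecidableEq κ] (Ys : List κ) (S : List α)
    (key : α → κ) (P : α → Bool) (hnd : Ys.Nodup) (hcov : ∀ p ∈ S, key p ∈ Ys) :
    (Ys.map (fun y => S.countP (fun p => (key p == y) && P p))).sum = S.countP P := by
  induction Ys generalizing S with
  | nil =>
    cases S with
    | nil => simp
    | cons a s => exact absurd (hcov a (by simp)) (by simp)
  | cons y ys ih =>
    have hynd : y ∉ ys := (List.nodup_cons.mp hnd).1
    have hnd' : ys.Nodup := (List.nodup_cons.mp hnd).2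
    have h1 : S.countP P
        = S.countP (fun p => (key p == y) && P p)
          + (S.filter (fun p => !(key p == y))).countP P := by
      rw [List.countP_filter]
      induction S with
      | nil => simp
      | cons a s ihs =>
        simp only [List.countP_cons, ihs (fun p hp => hcov p (by simp [hp]))]
        cases h : (key a == y) <;> cases hP : P a <;> simp <;> omega
    have h2 : ys.map (fun y' => S.countP (fun p => (key p == y') && P p))
        = ys.map (fun y' => (S.filter (fun p => !(key p == y))).countP
            (fun p => (key p == y') && P p)) := by
      apply List.map_congr_left
      intro y' hy'
      have hne : y' ≠ y := fun e => hynd (e ▸ hy')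
      rw [List.countP_filter]
      apply List.countP_congr
      intro p _
      by_cases h : key p = y'
      · simp [h]
        exact fun _ => hne
      · simp [h]
    have hcov' : ∀ p ∈ S.filter (fun p => !(key p == y)), key p ∈ ys := by
      intro p hp
      rcases List.mem_filter.mp hp with ⟨hpS, hpne⟩
      rcases List.mem_cons.mp (hcov p hpS) with h | h
      · simp [h] at hpne
      · exact h
    rw [List.map_cons, List.sum_cons, h2, ih _ hnd' hcov', h1]

lemma pvRow_mem (M : List (Int × Int)) (k x : Int) :
    (x ∈ (M.filter (fun q => q.1 == k)).map (·.2)) ↔ (k, x) ∈ M := by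
  simp only [List.mem_map, List.mem_filter, beq_iff_eq]
  constructor
  · rintro ⟨q, ⟨hqM, hq1⟩, hq2⟩
    have : q = (k, x) := by cases q; simp_all
    exact this ▸ hqM
  · intro h
    exact ⟨(k, x), ⟨h, rfl⟩, rfl⟩

lemma pvRow_nodup (M : List (Int × Int)) (hnd : M.Nodup) (k : Int) :
    ((M.filter (fun q => q.1 == k)).map (·.2)).Nodup := by
  apply List.Nodup.map_on _ (hnd.filter _)
  intro a ha b hb hab
  rcases List.mem_filter.mp ha with ⟨_, ha1⟩
  rcases List.mem_filter.mp hb with ⟨_, hb1⟩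
  cases a; cases b; simp_all

-- B's group-by / sort / scan over one coordinate counts the (+1)-neighbour pairs
lemma pvGroup (M : List (Int × Int)) (hnd : M.Nodup) :
    (PySem.Dict.values (M.foldl (fun d q => PySem.Dict.modify d q.1 [] (· ++ [q.2]))
        PySem.Dict.empty)).foldl (fun acc xs => acc + pvAdjSorted xs) 0
      = (M.countP (fun q => decide ((q.1, q.2 + 1) ∈ M)) : Nat) := by
  set d := M.foldl (fun d q => PySem.Dict.modify d q.1 [] (· ++ [q.2])) PySem.Dict.empty with hd
  have hkeys : d.keys = PySem.Set.ofList (M.map (·.1)) := by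
    rw [hd, PySem.Dict.keys_foldl_modify_key]
    simp [PySem.Dict.keys_empty, PySem.Set.update, PySem.Set.ofList_eq_foldl]
  have hknd : d.keys.Nodup := by
    rw [hd]
    apply PySem.Dict.nodup_keys_foldl_modify_key
    simp [PySem.Dict.keys_empty]
  have hget : ∀ k, d.getD k [] = (M.filter (fun q => q.1 == k)).map (·.2) := by
    intro k
    rw [hd, PySem.Dict.getD_foldl_modify_append]
    simp
  rw [PySem.Dict.values_eq_map_keys d hknd [], PySem.List.foldl_add]
  have hmapeq : d.keys.map (fun k => pvAdjSorted (d.getD k []))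
      = d.keys.map (fun k => ((M.countP (fun q => (q.1 == k) &&
          decide ((q.1, q.2 + 1) ∈ M)) : Nat) : Int)) := by
    apply List.map_congr_left
    intro k hk
    rw [hget k, pvAdjSorted_eq _ (pvRow_nodup M hnd k)]
    congr 1
    rw [List.countP_map, List.countP_filter]
    apply List.countP_congr
    intro q hq
    by_cases h1 : q.1 = k
    · have : ((q.2 + 1 ∈ (M.filter (fun q => q.1 == k)).map (·.2)) ↔ ((q.1, q.2 + 1) ∈ M)) := by
        rw [pvRow_mem, h1]
      by_cases h2 : (q.1, q.2 + 1) ∈ M <;> simp_all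
    · simp [h1]
  rw [List.map_map]
  simp only [Function.comp_def]
  rw [hmapeq, hkeys, zero_add]
  have hcast : ((PySem.Set.ofList (M.map (·.1))).map (fun k => ((M.countP (fun q => (q.1 == k) &&
        decide ((q.1, q.2 + 1) ∈ M)) : Nat) : Int))).sum
      = (((PySem.Set.ofList (M.map (·.1))).map (fun k => M.countP (fun q => (q.1 == k) &&
        decide ((q.1, q.2 + 1) ∈ M)))).sum : Nat) := by
    push_cast
    simp [Function.comp_def]
  rw [hcast]
  exact_mod_cast countP_partition (PySem.Set.ofList (M.map (·.1))) M (fun q : Int × Int => q.1)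
      (fun q => decide ((q.1, q.2 + 1) ∈ M)) (PySem.Set.nodup_ofList _)
      (fun p hp => by
        rw [PySem.Set.mem_ofList]
        exact List.mem_map_of_mem hp)

-- ===== VERDICT (by name: the statement is the Claim_ definition above) =====
theorem check_hv_spec : Claim_equal_check_hv := by
  intro points _
  unfold Spec_check_hv check_hv check_hv_alt
  have hcp : create_pset points = PySem.Set.ofList points := by
    rw [PySem.Set.ofList_eq_foldl]
    rfl
  set S := PySem.Set.ofList points with hS
  have hnd : S.Nodup := PySem.Set.nodup_ofList points
  rw [hcp, pvCheckLoop_eq S 0 0 hnd]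
  -- rows: fold over S with key p.2 is the fold over the swapped list
  have hrows : S.foldl (fun d p => PySem.Dict.modify d p.2 [] (· ++ [p.1])) PySem.Dict.empty
      = (S.map (fun p => (p.2, p.1))).foldl
          (fun d q => PySem.Dict.modify d q.1 [] (· ++ [q.2])) PySem.Dict.empty := by
    rw [List.foldl_map]
  have hndM : (S.map (fun p => (p.2, p.1))).Nodup :=
    hnd.map (fun a b hab => by cases a; cases b; simp_all [Prod.ext_iff])
  have hrcount : (S.map (fun p => (p.2, p.1))).countP
        (fun q => decide ((q.1, q.2 + 1) ∈ S.map (fun p => (p.2, p.1))))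
      = pvNbr S pvH := by
    rw [List.countP_map]
    apply List.countP_congr
    intro p hp
    simp only [pvH, Function.comp_apply]
    simp only [decide_eq_true_eq]
    constructor
    · intro hmem
      rcases List.mem_map.mp hmem with ⟨r, hrS, hre⟩
      have : r = (p.1 + 1, p.2) := by cases r; simp_all [Prod.ext_iff]
      exact this ▸ hrS
    · intro hmem
      exact List.mem_map.mpr ⟨(p.1 + 1, p.2), hmem, rfl⟩
  simp only [hrows]
  rw [pvGroup _ hndM, pvGroup _ hnd, hrcount]
  have hccount : S.countP (fun q => decide ((q.1, q.2 + 1) ∈ S)) = pvNbr S pvV := rfl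
  rw [hccount]
  exact Prod.ext (by push_cast; ring) (by push_cast; ring)
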